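-- pv_equiv track=rewrite | github.com/epam/atap-backend | framework/libs/background_images.py | check_image_contain_elem
-- ===== SOURCE A (Python) =====
-- def check_image_contain_dot(x_image: int, y_image: int, w_image: int, h_image: int, dot: tuple) -> bool:
--     return x_image <= dot[0] <= x_image + w_image and y_image <= dot[1] <= y_image + h_image
--
-- def check_image_contain_elem(
--         x_image: int, y_image: int, w_image: int, h_image: int, x_elem: int, y_elem: int, w_elem: int, h_elem: int
-- ) -> bool:
--     dots = (
--         (x_elem, y_elem),
--         (x_elem, y_elem + h_elem),
--         (x_elem + w_elem, y_elem + h_elem),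
--         (x_elem + w_elem, y_elem)
--     )
--     for dot in dots:
--         if not check_image_contain_dot(x_image, y_image, w_image, h_image, dot):
--             return False
--     return True
-- ===== SOURCE B (Python) =====
-- def check_image_contain_elem(
--         x_image: int, y_image: int, w_image: int, h_image: int, x_elem: int, y_elem: int, w_elem: int, h_elem: int
-- ) -> bool:
--     return (x_image <= x_elem <= x_image + w_image
--             and x_image <= x_elem + w_elem <= x_image + w_image
--             and y_image <= y_elem <= y_image + h_image
--             and y_image <= y_elem + h_elem <= y_image + h_image)
-- ===== Notes on version B (the rewrite author's own statement) =====
-- stated objective: simpler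
-- what changed: Replaces the corner-tuple construction, loop and point-containment helper by one boolean expression testing per-axis interval containment of both element endpoints.
import Mathlib
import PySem

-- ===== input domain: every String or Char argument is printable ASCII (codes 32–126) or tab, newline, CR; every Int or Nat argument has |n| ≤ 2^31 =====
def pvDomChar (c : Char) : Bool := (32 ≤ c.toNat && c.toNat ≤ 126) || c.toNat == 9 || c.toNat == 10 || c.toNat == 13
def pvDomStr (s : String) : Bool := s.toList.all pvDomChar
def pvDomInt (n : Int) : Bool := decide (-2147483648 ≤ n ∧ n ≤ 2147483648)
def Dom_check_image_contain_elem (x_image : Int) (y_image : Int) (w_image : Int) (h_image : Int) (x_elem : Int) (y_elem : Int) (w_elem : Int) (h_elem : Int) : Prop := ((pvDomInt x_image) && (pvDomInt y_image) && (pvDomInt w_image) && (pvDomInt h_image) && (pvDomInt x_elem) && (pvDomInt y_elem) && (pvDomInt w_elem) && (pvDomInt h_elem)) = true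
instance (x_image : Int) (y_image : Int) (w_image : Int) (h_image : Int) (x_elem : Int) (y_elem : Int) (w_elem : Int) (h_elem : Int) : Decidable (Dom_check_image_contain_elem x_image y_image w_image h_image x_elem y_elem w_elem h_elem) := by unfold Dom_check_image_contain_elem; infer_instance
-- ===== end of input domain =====

-- ===== PORT A =====
-- B replaces the corner-tuple loop and the dot-containment helper by one per-axis interval-containment expression (simpler).
def check_image_contain_dot (x_image : Int) (y_image : Int) (w_image : Int) (h_image : Int) (dot : Int × Int) : Bool :=
  decide (x_image ≤ dot.1 ∧ dot.1 ≤ x_image + w_image) && decide (y_image ≤ dot.2 ∧ dot.2 ≤ y_image + h_image)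

-- the 'for dot in dots: if not …: return False' loop, step for step
def check_elem_loop (x_image : Int) (y_image : Int) (w_image : Int) (h_image : Int) : List (Int × Int) → Bool
  | [] => true
  | dot :: rest =>
    if !(check_image_contain_dot x_image y_image w_image h_image dot) then false
    else check_elem_loop x_image y_image w_image h_image rest

def check_image_contain_elem (x_image : Int) (y_image : Int) (w_image : Int) (h_image : Int) (x_elem : Int) (y_elem : Int) (w_elem : Int) (h_elem : Int) : Bool :=
  let dots : List (Int × Int) :=
    [ (x_elem, y_elem),
      (x_elem, y_elem + h_elem),
      (x_elem + w_elem, y_elem + h_elem),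
      (x_elem + w_elem, y_elem) ]
  check_elem_loop x_image y_image w_image h_image dots

-- ===== PORT B =====
def check_image_contain_elem_alt (x_image : Int) (y_image : Int) (w_image : Int) (h_image : Int) (x_elem : Int) (y_elem : Int) (w_elem : Int) (h_elem : Int) : Bool :=
  decide (x_image ≤ x_elem ∧ x_elem ≤ x_image + w_image) &&
  decide (x_image ≤ x_elem + w_elem ∧ x_elem + w_elem ≤ x_image + w_image) &&
  decide (y_image ≤ y_elem ∧ y_elem ≤ y_image + h_image) &&
  decide (y_image ≤ y_elem + h_elem ∧ y_elem + h_elem ≤ y_image + h_image)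

-- ===== PRECONDITION & SPEC =====
def Spec_check_image_contain_elem (x_image : Int) (y_image : Int) (w_image : Int) (h_image : Int) (x_elem : Int) (y_elem : Int) (w_elem : Int) (h_elem : Int) (out : Bool) : Prop := out = check_image_contain_elem_alt x_image y_image w_image h_image x_elem y_elem w_elem h_elem
instance (x_image : Int) (y_image : Int) (w_image : Int) (h_image : Int) (x_elem : Int) (y_elem : Int) (w_elem : Int) (h_elem : Int) (out : Bool) : Decidable (Spec_check_image_contain_elem x_image y_image w_image h_image x_elem y_elem w_elem h_elem out) := by unfold Spec_check_image_contain_elem; infer_instance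

-- ===== CLAIM (what is proved, stated in full; the proofs are below) =====
def Claim_equal_check_image_contain_elem : Prop := ∀ (x_image : Int) (y_image : Int) (w_image : Int) (h_image : Int) (x_elem : Int) (y_elem : Int) (w_elem : Int) (h_elem : Int), Dom_check_image_contain_elem x_image y_image w_image h_image x_elem y_elem w_elem h_elem → Spec_check_image_contain_elem x_image y_image w_image h_image x_elem y_elem w_elem h_elem (check_image_contain_elem x_image y_image w_image h_image x_elem y_elem w_elem h_elem)

-- ===== LEMMAS AND PROOFS =====

-- ===== VERDICT (by name: the statement is the Claim_ definition above) =====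
theorem check_image_contain_elem_spec : Claim_equal_check_image_contain_elem := by
  intro x_image y_image w_image h_image x_elem y_elem w_elem h_elem _
  simp only [Spec_check_image_contain_elem, check_image_contain_elem, check_image_contain_elem_alt,
    check_elem_loop, check_image_contain_dot]
  by_cases h1 : x_image ≤ x_elem ∧ x_elem ≤ x_image + w_image <;>
  by_cases h2 : x_image ≤ x_elem + w_elem ∧ x_elem + w_elem ≤ x_image + w_image <;>
  by_cases h3 : y_image ≤ y_elem ∧ y_elem ≤ y_image + h_image <;>
  by_cases h4 : y_image ≤ y_elem + h_elem ∧ y_elem + h_elem ≤ y_image + h_image <;>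
  simp [h1, h2, h3, h4]
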